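-- pv_equiv track=rewrite | github.com/doanminhdang/mini-codes | python/tudien/readocr.py | re_parse
-- ===== SOURCE A (Python) =====
-- def check_capital(phrase):
--     format_capital = []
--     words = phrase.split()
--     for k in range(len(words)):
--         if words[k].isupper():
--             format_capital.append(True)
--         else:
--             format_capital.append(False)
--     return words, format_capital
--
-- def merge_similar_series(words, case_capital):
--     newwords = list(words)
--     newcase_capital = list(case_capital)
--     for k in range(len(words)-1,0,-1):
--         if newcase_capital[k] == newcase_capital[k-1]:
--             newwords[k-1] = ' '.join([newwords[k-1], newwords[k]])
--             del newwords[k]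
--             del newcase_capital[k]
--     return newwords, newcase_capital
--
-- def re_parse(word_texts, word_format_bolds, word_format_italics):
--     """Fix the leftover mistake in the data parsed, some example items:
--     TOÁN, S_CHÊ figure
--     hình
--     (bản vẽ) - is a separate item, in fact it is a comment for previous item
--     AB-Betrieb m Đ_TỬ dass AB mode chê'độ hạng AB, splitted into:
--     ['AB-Betrieb', 'm', 'Đ_TỬ', 'dass AB', 'mode', 'chê'độ hạng', 'AB']
--     """
--     newword_texts = []
--     newwordcase_capitals = []
--     newword_format_bolds = []
--     newword_format_italics = []
--     newlinerole_comment = []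
--     for k in range(len(word_texts)):
--         phrase = word_texts[k]
--         words, wordcase_capital = check_capital(phrase)
--         words, wordcase_capital = merge_similar_series(words, wordcase_capital)
--         newword_texts.extend(words)
--         newwordcase_capitals.extend(wordcase_capital)
--         for n in range(len(words)):
--             newword_format_bolds.append(word_format_bolds[k])
--             newword_format_italics.append(word_format_italics[k])
--             # if the word is in (), it should be a comment for the previous one
--             if words[n].strip(',')[0]=='(' and words[n].strip(',')[-1]==')':
--                 newlinerole_comment.append(True)
--             else:
--                 newlinerole_comment.append(False)
--     return newword_texts, newwordcase_capitals, newword_format_bolds, newword_format_italics, newlinerole_comment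
-- ===== SOURCE B (Python) =====
-- def re_parse(word_texts, word_format_bolds, word_format_italics):
--     texts, caps, bolds, itals, comments = [], [], [], [], []
--     for k, phrase in enumerate(word_texts):
--         words = phrase.split()
--         if not words:
--             continue
--         # single forward pass: group consecutive words with equal .isupper()
--         runs = []
--         run, run_cap = words[0], words[0].isupper()
--         for w in words[1:]:
--             c = w.isupper()
--             if c == run_cap:
--                 run = run + ' ' + w
--             else:
--                 runs.append((run, run_cap))
--                 run, run_cap = w, c
--         runs.append((run, run_cap))
--         for merged, cap in runs:
--             texts.append(merged)
--             caps.append(cap)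
--             bolds.append(word_format_bolds[k])
--             itals.append(word_format_italics[k])
--             s = merged.strip(',')
--             comments.append(s[0] == '(' and s[-1] == ')')
--     return texts, caps, bolds, itals, comments
-- ===== Notes on version B (the rewrite author's own statement) =====
-- stated objective: faster
-- what changed: A re-splits each phrase and merges equal-case neighbours by a backward delete-from-list pass (list del/join per merge, quadratic in a phrase's word count); B builds the merged runs in one forward pass that groups consecutive words with equal .isupper(), emitting all five output lists per run.
import Mathlib
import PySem

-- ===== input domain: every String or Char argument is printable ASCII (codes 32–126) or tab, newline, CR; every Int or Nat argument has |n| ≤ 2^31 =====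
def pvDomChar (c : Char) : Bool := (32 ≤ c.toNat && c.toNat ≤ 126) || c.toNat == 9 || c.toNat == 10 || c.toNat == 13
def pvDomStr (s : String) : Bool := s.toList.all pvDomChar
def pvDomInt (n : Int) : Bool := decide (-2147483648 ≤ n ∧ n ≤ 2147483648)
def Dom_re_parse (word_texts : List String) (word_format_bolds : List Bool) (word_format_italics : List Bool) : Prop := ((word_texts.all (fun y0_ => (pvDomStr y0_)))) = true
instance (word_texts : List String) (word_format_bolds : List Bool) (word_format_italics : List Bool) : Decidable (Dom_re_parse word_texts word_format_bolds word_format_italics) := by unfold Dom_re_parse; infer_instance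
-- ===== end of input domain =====

-- B replaces A's backward delete-and-merge pass per phrase by a single forward pass grouping
-- consecutive same-case words (objective: alternative).

-- ===== PORT A =====

-- str.isupper() on the ASCII domain: at least one letter, and no lowercase letter
def pyIsupper (s : String) : Bool :=
  (s.toList.any (fun c => PySem.Chars.isalpha c)) && (s.toList.all (fun c => !PySem.Chars.islower c))

-- words[n].strip(',')[0]=='(' and words[n].strip(',')[-1]==')'; Python raises IndexError when the
-- stripped word is empty — there the port reads the default ' ' (such inputs are excluded by Pre_)
def commentFlag (w : String) : Bool :=
  ((PySem.List.pyGet? (PySem.Str.stripChars w ",").toList 0).getD ' ' == '(') &&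
  ((PySem.List.pyGet? (PySem.Str.stripChars w ",").toList (-1)).getD ' ' == ')')

def check_capital (phrase : String) : List String × List Bool :=
  let words := PySem.Str.split₀ phrase
  (words, words.foldl (fun a w => if pyIsupper w then a ++ [true] else a ++ [false]) [])

-- the backward loop 'for k in range(len(words)-1,0,-1): if flags equal, join k-1 with k and delete k'
-- as the obvious structural recursion from the right over the zipped (word, flag) list
def mergeLoopA : List (String × Bool) → List (String × Bool)
  | [] => []
  | (w₁, c₁) :: rest =>
    match mergeLoopA rest with
    | [] => [(w₁, c₁)]
    | (w₂, c₂) :: t =>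
      if c₁ == c₂ then (w₁ ++ " " ++ w₂, c₁) :: t else (w₁, c₁) :: (w₂, c₂) :: t

def merge_similar_series (words : List String) (case_capital : List Bool) : List String × List Bool :=
  let merged := mergeLoopA (words.zip case_capital)
  (merged.map Prod.fst, merged.map Prod.snd)

-- the body of 'for k in range(len(word_texts))' (kp = (k, word_texts[k]))
def reparse_stepA (word_format_bolds word_format_italics : List Bool)
    (acc : List String × List Bool × List Bool × List Bool × List Bool) (kp : Int × String) :
    List String × List Bool × List Bool × List Bool × List Bool :=
  let p1 := check_capital kp.2
  let p2 := merge_similar_series p1.1 p1.2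
  let inner := p2.1.foldl
    (fun (a : List Bool × List Bool × List Bool) w =>
      (a.1 ++ [PySem.List.pyGetD word_format_bolds kp.1 false],
       a.2.1 ++ [PySem.List.pyGetD word_format_italics kp.1 false],
       if commentFlag w then a.2.2 ++ [true] else a.2.2 ++ [false]))
    (acc.2.2.1, acc.2.2.2.1, acc.2.2.2.2)
  (acc.1 ++ p2.1, acc.2.1 ++ p2.2, inner.1, inner.2.1, inner.2.2)

def re_parse (word_texts : List String) (word_format_bolds : List Bool) (word_format_italics : List Bool) : List String × List Bool × List Bool × List Bool × List Bool :=
  (PySem.List.enumerate word_texts 0).foldl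
    (reparse_stepA word_format_bolds word_format_italics) ([], [], [], [], [])

-- ===== PORT B =====

-- the body of 'for k, phrase in enumerate(word_texts)' in Source B: one forward pass grouping
-- consecutive words with equal .isupper() into runs, then one append per run
-- the body of Source B's run-grouping loop: extend the current run or close it and start a new one
def groupStep (st : List (String × Bool) × String × Bool) (u : String) :
    List (String × Bool) × String × Bool :=
  if pyIsupper u == st.2.2 then (st.1, st.2.1 ++ " " ++ u, st.2.2)
  else (st.1 ++ [(st.2.1, st.2.2)], u, pyIsupper u)

def reparse_stepB (word_format_bolds word_format_italics : List Bool)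
    (acc : List String × List Bool × List Bool × List Bool × List Bool) (kp : Int × String) :
    List String × List Bool × List Bool × List Bool × List Bool :=
  match PySem.Str.split₀ kp.2 with
  | [] => acc
  | w :: rest =>
    let st := rest.foldl groupStep ([], w, pyIsupper w)
    let runs := st.1 ++ [(st.2.1, st.2.2)]
    runs.foldl
      (fun (a : List String × List Bool × List Bool × List Bool × List Bool) rc =>
        (a.1 ++ [rc.1], a.2.1 ++ [rc.2],
         a.2.2.1 ++ [PySem.List.pyGetD word_format_bolds kp.1 false],
         a.2.2.2.1 ++ [PySem.List.pyGetD word_format_italics kp.1 false],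
         a.2.2.2.2 ++ [commentFlag rc.1]))
      acc

def re_parse_alt (word_texts : List String) (word_format_bolds : List Bool) (word_format_italics : List Bool) : List String × List Bool × List Bool × List Bool × List Bool :=
  (PySem.List.enumerate word_texts 0).foldl
    (reparse_stepB word_format_bolds word_format_italics) ([], [], [], [], [])

-- ===== PRECONDITION & SPEC =====
-- Pre_ excludes exactly the inputs where Python A raises IndexError: a phrase containing an
-- all-comma word isolated between uppercase words (its merged word strips to '' and '[0]' raises),
-- or a phrase with words at an index k beyond word_format_bolds / word_format_italics.
def Pre_re_parse (word_texts : List String) (word_format_bolds : List Bool) (word_format_italics : List Bool) : Prop :=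
  ∀ k, k < word_texts.length →
    ((PySem.Str.split₀ (word_texts.getD k "") ≠ []) →
       k < word_format_bolds.length ∧ k < word_format_italics.length) ∧
    ∀ i, i < (PySem.Str.split₀ (word_texts.getD k "")).length →
      ¬ (((PySem.Str.split₀ (word_texts.getD k "")).getD i "").toList.all (· == ',') = true ∧
         (i = 0 ∨ pyIsupper ((PySem.Str.split₀ (word_texts.getD k "")).getD (i-1) "") = true) ∧
         (i + 1 = (PySem.Str.split₀ (word_texts.getD k "")).length ∨
           pyIsupper ((PySem.Str.split₀ (word_texts.getD k "")).getD (i+1) "") = true))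

instance (word_texts : List String) (word_format_bolds : List Bool) (word_format_italics : List Bool) : Decidable (Pre_re_parse word_texts word_format_bolds word_format_italics) := by unfold Pre_re_parse; infer_instance

def pvWitness_re_parse : List String × List Bool × List Bool :=
  (["AB-Betrieb m OK dass AB mode", "(x)", ""], [true, false, true], [false, true, false])

def Spec_re_parse (word_texts : List String) (word_format_bolds : List Bool) (word_format_italics : List Bool) (out : List String × List Bool × List Bool × List Bool × List Bool) : Prop := out = re_parse_alt word_texts word_format_bolds word_format_italics
instance (word_texts : List String) (word_format_bolds : List Bool) (word_format_italics : List Bool) (out : List String × List Bool × List Bool × List Bool × List Bool) : Decidable (Spec_re_parse word_texts word_format_bolds word_format_italics out) := by unfold Spec_re_parse; infer_instance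

-- ===== CLAIM (what is proved, stated in full; the proofs are below) =====
def Claim_equal_re_parse : Prop := ∀ (word_texts : List String) (word_format_bolds : List Bool) (word_format_italics : List Bool), Dom_re_parse word_texts word_format_bolds word_format_italics → Pre_re_parse word_texts word_format_bolds word_format_italics → Spec_re_parse word_texts word_format_bolds word_format_italics (re_parse word_texts word_format_bolds word_format_italics)

-- ===== LEMMAS AND PROOFS =====

-- proof-only recursive form of B's forward run-grouping loop
def runsRec : String → Bool → List String → List (String × Bool)
  | run, cap, [] => [(run, cap)]
  | run, cap, u :: us =>
    if pyIsupper u == cap then runsRec (run ++ " " ++ u) cap us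
    else (run, cap) :: runsRec u (pyIsupper u) us

lemma capfold (ws : List String) (acc : List Bool) :
    ws.foldl (fun a w => if pyIsupper w then a ++ [true] else a ++ [false]) acc
      = acc ++ ws.map pyIsupper := by
  induction ws generalizing acc with
  | nil => simp
  | cons w ws ih => cases h : pyIsupper w <;> simp [h, ih]

lemma zipself {α β : Type} (f : α → β) (ws : List α) :
    ws.zip (ws.map f) = ws.map (fun w => (w, f w)) := by
  induction ws with
  | nil => rfl
  | cons w ws ih => simp [ih]

lemma runsRec_head_shift (ws : List String) : ∀ (run : String) (cap : Bool),
    ∃ w' t', runsRec run cap ws = (w', cap) :: t' ∧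
      ∀ x : String, runsRec (x ++ " " ++ run) cap ws = (x ++ " " ++ w', cap) :: t' := by
  induction ws with
  | nil => exact fun run cap => ⟨run, [], rfl, fun x => rfl⟩
  | cons u us ih =>
    intro run cap
    by_cases h : pyIsupper u == cap
    · obtain ⟨w', t', h1, h2⟩ := ih (run ++ " " ++ u) cap
      refine ⟨w', t', by simp [runsRec, h, h1], fun x => ?_⟩
      have hx := h2 x
      simp only [String.append_assoc] at hx ⊢
      simp [runsRec, h, String.append_assoc, hx]
    · exact ⟨run, runsRec u (pyIsupper u) us, by simp [runsRec, h], fun x => by simp [runsRec, h]⟩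

lemma merge_eq_runs (ws : List String) : ∀ (w : String) (cap : Bool),
    mergeLoopA ((w, cap) :: ws.map (fun u => (u, pyIsupper u))) = runsRec w cap ws := by
  induction ws with
  | nil => intro w cap; simp [mergeLoopA, runsRec]
  | cons u us ih =>
    intro w cap
    have hm := ih u (pyIsupper u)
    obtain ⟨w', t', h1, h2⟩ := runsRec_head_shift us u (pyIsupper u)
    by_cases h : cap == pyIsupper u
    · have hc : cap = pyIsupper u := by revert h; cases cap <;> cases pyIsupper u <;> simp
      simp only [List.map_cons, mergeLoopA, hm, h1]
      rw [if_pos (by simp [hc])]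
      have := h2 w
      rw [h1] at hm
      simp [runsRec, hc, this]
    · have hcf : (pyIsupper u == cap) = false := by
        revert h; cases cap <;> cases pyIsupper u <;> simp
      have hcf2 : (cap == pyIsupper u) = false := by
        revert h; cases cap <;> cases pyIsupper u <;> simp
      simp only [List.map_cons, mergeLoopA, hm, h1, hcf2, Bool.false_eq_true, if_false]
      rw [← h1]
      conv_rhs => rw [runsRec]
      simp [hcf]

lemma innerA (bv iv : Bool) (l : List String) :
    ∀ (a : List Bool × List Bool × List Bool),
    l.foldl (fun a w => (a.1 ++ [bv], a.2.1 ++ [iv],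
        if commentFlag w then a.2.2 ++ [true] else a.2.2 ++ [false])) a
      = (a.1 ++ l.map (fun _ => bv), a.2.1 ++ l.map (fun _ => iv), a.2.2 ++ l.map commentFlag) := by
  induction l with
  | nil => simp
  | cons w l ih =>
    intro a
    cases h : commentFlag w <;> simp [h, ih]

lemma innerB (bv iv : Bool) (runs : List (String × Bool)) :
    ∀ (a : List String × List Bool × List Bool × List Bool × List Bool),
    runs.foldl (fun a rc => (a.1 ++ [rc.1], a.2.1 ++ [rc.2],
        a.2.2.1 ++ [bv], a.2.2.2.1 ++ [iv], a.2.2.2.2 ++ [commentFlag rc.1])) a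
      = (a.1 ++ runs.map (·.1), a.2.1 ++ runs.map (·.2),
         a.2.2.1 ++ runs.map (fun _ => bv), a.2.2.2.1 ++ runs.map (fun _ => iv),
         a.2.2.2.2 ++ runs.map (fun rc => commentFlag rc.1)) := by
  induction runs with
  | nil => simp
  | cons rc runs ih => intro a; simp [ih]

lemma foldRuns (ws : List String) : ∀ (pre : List (String × Bool)) (run : String) (cap : Bool),
    (ws.foldl groupStep (pre, run, cap)).1
      ++ [((ws.foldl groupStep (pre, run, cap)).2.1, (ws.foldl groupStep (pre, run, cap)).2.2)]
      = pre ++ runsRec run cap ws := by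
  induction ws with
  | nil => intro pre run cap; simp [runsRec]
  | cons u us ih =>
    intro pre run cap
    by_cases h : pyIsupper u == cap
    · simp only [List.foldl_cons, groupStep, h, if_true, ih, runsRec]
    · simp only [List.foldl_cons, groupStep, h, if_false, ih, runsRec, Bool.false_eq_true]
      simp

lemma step_eq (wbs wis : List Bool)
    (acc : List String × List Bool × List Bool × List Bool × List Bool) (kp : Int × String) :
    reparse_stepA wbs wis acc kp = reparse_stepB wbs wis acc kp := by
  cases hs : PySem.Str.split₀ kp.2 with
  | nil =>
    simp [reparse_stepA, reparse_stepB, check_capital, merge_similar_series, hs, mergeLoopA]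
  | cons w rest =>
    simp only [reparse_stepA, reparse_stepB, check_capital, merge_similar_series, hs,
      capfold, List.nil_append, List.map_cons, foldRuns, innerA, innerB]
    rw [List.zip_cons_cons, zipself, merge_eq_runs]
    simp [List.map_map, Function.comp_def]

theorem re_parse_spec : Claim_equal_re_parse := by
  intro wts wbs wis _hD _hP
  show re_parse wts wbs wis = re_parse_alt wts wbs wis
  have hst : reparse_stepA wbs wis = reparse_stepB wbs wis :=
    funext fun a => funext fun p => step_eq wbs wis a p
  simp only [re_parse, re_parse_alt, hst]
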